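-- pv_equiv track=rewrite | github.com/SenseTime-FVG/sensenova-claw | sensenova_claw/capabilities/tools/builtin.py | _normalize_plain_text
-- ===== SOURCE A (Python) =====
-- def _normalize_plain_text(text: str) -> str:
--     lines = [line.strip() for line in text.splitlines()]
--     normalized: list[str] = []
--     blank_count = 0
--     for line in lines:
--         if not line:
--             blank_count += 1
--             if blank_count <= 1:
--                 normalized.append("")
--             continue
--         blank_count = 0
--         normalized.append(line)
--     return "\n".join(normalized).strip()
-- ===== SOURCE B (Python) =====
-- def _normalize_plain_text(text: str) -> str:
--     paragraphs = []
--     current = []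
--     for raw in text.splitlines():
--         line = raw.strip()
--         if line:
--             current.append(line)
--         elif current:
--             paragraphs.append(current)
--             current = []
--     if current:
--         paragraphs.append(current)
--     return "\n\n".join("\n".join(p) for p in paragraphs)
-- ===== Notes on version B (the rewrite author's own statement) =====
-- stated objective: alternative
-- what changed: Replaces A's blank_count state machine (which emits blank-line sentinels and needs a final .strip()) with grouping the stripped lines into paragraphs and joining the paragraphs with a blank-line separator, so no sentinel lines and no final strip are needed.
import Mathlib
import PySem

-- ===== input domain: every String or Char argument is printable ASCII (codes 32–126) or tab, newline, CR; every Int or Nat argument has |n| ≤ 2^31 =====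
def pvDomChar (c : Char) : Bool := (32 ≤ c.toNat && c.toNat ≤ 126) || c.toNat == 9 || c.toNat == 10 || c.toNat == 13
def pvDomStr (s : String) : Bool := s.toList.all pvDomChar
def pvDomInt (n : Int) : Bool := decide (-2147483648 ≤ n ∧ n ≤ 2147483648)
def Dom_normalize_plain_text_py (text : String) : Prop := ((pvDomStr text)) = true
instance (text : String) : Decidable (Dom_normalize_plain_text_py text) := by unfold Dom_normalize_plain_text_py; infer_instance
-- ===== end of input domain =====

-- B replaces A's blank_count state machine plus final .strip() by grouping the stripped
-- lines into paragraphs and joining the paragraphs with "\n\n" (alternative decomposition,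
-- same asymptotic cost).

-- ===== PORT A =====
def normalize_plain_text_py (text : String) : String :=
  let lines := (PySem.Str.splitlines text).map (fun line => PySem.Str.strip line)
  let st := lines.foldl (fun (st : Int × List String) line =>
    if line = "" then
      let bc := st.1 + 1
      if bc ≤ 1 then (bc, st.2 ++ [""]) else (bc, st.2)
    else (0, st.2 ++ [line])) (0, [])
  PySem.Str.strip (PySem.Str.join "\n" st.2)

-- ===== PORT B =====
def normalize_plain_text_py_alt (text : String) : String :=
  let st := (PySem.Str.splitlines text).foldl
    (fun (st : List (List String) × List String) raw =>
      let line := PySem.Str.strip raw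
      if line ≠ "" then (st.1, st.2 ++ [line])
      else if st.2 ≠ [] then (st.1 ++ [st.2], ([] : List String))
      else st) ([], [])
  let paragraphs := if st.2 ≠ [] then st.1 ++ [st.2] else st.1
  PySem.Str.join "\n\n" (paragraphs.map (fun p => PySem.Str.join "\n" p))

-- ===== PRECONDITION & SPEC =====
def Spec_normalize_plain_text_py (text : String) (out : String) : Prop := out = normalize_plain_text_py_alt text
instance (text : String) (out : String) : Decidable (Spec_normalize_plain_text_py text out) := by unfold Spec_normalize_plain_text_py; infer_instance

-- ===== CLAIM (what is proved, stated in full; the proofs are below) =====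
def Claim_equal_normalize_plain_text_py : Prop := ∀ (text : String), Dom_normalize_plain_text_py text → Spec_normalize_plain_text_py text (normalize_plain_text_py text)

-- ===== LEMMAS AND PROOFS =====

-- A's loop, as a recursion producing the lines still to be appended from state blank_count = bc.
def recA : List (List Char) → Int → List (List Char)
  | [], _ => []
  | l :: r, bc =>
    if l = [] then (if bc + 1 ≤ 1 then [] :: recA r (bc + 1) else recA r (bc + 1))
    else l :: recA r 0

-- B's loop, as a recursion producing the paragraphs still to be emitted from current = cur
-- (including the final flush of cur).
def recB : List (List Char) → List (List Char) → List (List (List Char))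
  | [], cur => if cur = [] then [] else [cur]
  | l :: r, cur =>
    if l = [] then (if cur = [] then recB r [] else cur :: recB r []) else recB r (cur ++ [l])

-- B's fold at the char level (input lines already stripped).
def chStep (st : List (List (List Char)) × List (List Char)) (l : List Char) :
    List (List (List Char)) × List (List Char) :=
  if l ≠ [] then (st.1, st.2 ++ [l]) else if st.2 ≠ [] then (st.1 ++ [st.2], []) else st

def foldBC : List (List Char) → List (List (List Char)) × List (List Char) →
    List (List (List Char)) × List (List Char)
  | [], st => st
  | l :: r, st => foldBC r (chStep st l)

-- ---- generic char/string helpers ----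

theorem ofList_eq_empty_iff (l : List Char) : String.ofList l = "" ↔ l = [] := by
  constructor
  · intro h; have := congrArg String.toList h; simpa using this
  · rintro rfl; rfl

theorem dropWhile_head_false {p : Char → Bool} {c : Char} {t : List Char}
    (h : List.dropWhile p (c :: t) = c :: t) : p c = false := by
  by_contra hc
  rw [List.dropWhile_cons, if_pos (by revert hc; cases p c <;> simp)] at h
  have h1 := congrArg List.length h
  have h2 := List.length_dropWhile_le p t
  simp only [List.length_cons] at h1
  omega

theorem dropWhile_dropWhile (p : Char → Bool) (l : List Char) :
    List.dropWhile p (List.dropWhile p l) = List.dropWhile p l := by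
  induction l with
  | nil => simp
  | cons c t ih => by_cases h : p c = true <;> simp [h, ih]

theorem lstrip_suffix (l : List Char) : PySem.Chars.lstrip l <:+ l :=
  List.dropWhile_suffix _

theorem rstrip_prefix (l : List Char) : PySem.Chars.rstrip l <+: l := by
  have h := List.dropWhile_suffix (l := l.reverse) PySem.Chars.isspace
  unfold PySem.Chars.rstrip
  have : (List.dropWhile PySem.Chars.isspace l.reverse).reverse <+: l.reverse.reverse :=
    List.reverse_prefix.mpr (by simpa using h)
  simpa using this

theorem of_strip_eq_self {l : List Char} (h : PySem.Chars.strip l = l) :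
    PySem.Chars.lstrip l = l ∧ PySem.Chars.rstrip l = l := by
  have hls := lstrip_suffix l
  have hrp := rstrip_prefix (PySem.Chars.lstrip l)
  have hlen1 : (PySem.Chars.lstrip l).length ≤ l.length := hls.sublist.length_le
  have hlen2 : (PySem.Chars.rstrip (PySem.Chars.lstrip l)).length ≤ (PySem.Chars.lstrip l).length :=
    hrp.sublist.length_le
  have hst : PySem.Chars.rstrip (PySem.Chars.lstrip l) = l := h
  have hlen3 := congrArg List.length hst
  have hlseq : PySem.Chars.lstrip l = l := hls.eq_of_length (by omega)
  refine ⟨hlseq, ?_⟩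
  rw [hlseq] at hst
  exact hst

theorem lstrip_cons_space {c : Char} (hc : PySem.Chars.isspace c = true) (s : List Char) :
    PySem.Chars.lstrip (c :: s) = PySem.Chars.lstrip s := by
  simp [PySem.Chars.lstrip, hc]

theorem lstrip_append_of_stripped {l : List Char} (hne : l ≠ [])
    (h : PySem.Chars.lstrip l = l) (s : List Char) :
    PySem.Chars.lstrip (l ++ s) = l ++ s := by
  obtain ⟨c, t, rfl⟩ := List.exists_cons_of_ne_nil hne
  have hc : PySem.Chars.isspace c = false := dropWhile_head_false h
  simp [PySem.Chars.lstrip, hc]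

theorem rstrip_append_of_ne_nil {t : List Char} (h : PySem.Chars.rstrip t ≠ []) (s : List Char) :
    PySem.Chars.rstrip (s ++ t) = s ++ PySem.Chars.rstrip t := by
  unfold PySem.Chars.rstrip at *
  rw [List.reverse_append, List.dropWhile_append]
  have hne : (List.dropWhile PySem.Chars.isspace t.reverse) ≠ [] := by
    intro h0; apply h; rw [h0]; rfl
  rw [if_neg (by simpa [List.isEmpty_iff] using hne)]
  simp

theorem rstrip_append_space {c : Char} (hc : PySem.Chars.isspace c = true) (s : List Char) :
    PySem.Chars.rstrip (s ++ [c]) = PySem.Chars.rstrip s := by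
  simp [PySem.Chars.rstrip, hc]

theorem strip_strip (s : List Char) :
    PySem.Chars.strip (PySem.Chars.strip s) = PySem.Chars.strip s := by
  unfold PySem.Chars.strip
  set u := PySem.Chars.lstrip s with hu
  have hrr : PySem.Chars.rstrip (PySem.Chars.rstrip u) = PySem.Chars.rstrip u := by
    unfold PySem.Chars.rstrip
    simp [dropWhile_dropWhile]
  rcases h0 : PySem.Chars.rstrip u with _ | ⟨c, t⟩
  · simp [PySem.Chars.lstrip, PySem.Chars.rstrip]
  · have hpre : PySem.Chars.rstrip u <+: u := rstrip_prefix u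
    rw [h0] at hpre
    have hune : u ≠ [] := by
      intro h1; rw [h1] at hpre; exact (List.cons_ne_nil c t) (List.prefix_nil.mp hpre)
    obtain ⟨c', t', hct⟩ := List.exists_cons_of_ne_nil hune
    have hu_self : List.dropWhile PySem.Chars.isspace u = u := by
      rw [hu]; exact dropWhile_dropWhile _ s
    have hc' : PySem.Chars.isspace c' = false := by
      apply dropWhile_head_false (t := t')
      rw [← hct]; exact hu_self
    have hcc : c = c' := by
      rw [hct] at hpre
      obtain ⟨r, hr⟩ := hpre
      exact (List.cons.injEq _ _ _ _ ▸ hr.symm) |>.1.symm ▸ rfl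
    have hl : PySem.Chars.lstrip (PySem.Chars.rstrip u) = PySem.Chars.rstrip u := by
      rw [h0]
      simp [PySem.Chars.lstrip, hcc ▸ hc']
    rw [← h0, hl, hrr]

-- join over ['\n'] / ['\n','\n']
theorem join_cons (sep x : List Char) (xs : List (List Char)) :
    PySem.Chars.join sep (x :: xs) = x ++ (if xs = [] then [] else sep ++ PySem.Chars.join sep xs) := by
  cases xs <;> simp [PySem.Chars.join, List.intercalate, List.intersperse]

theorem join_append (sep : List Char) {xs ys : List (List Char)} (hx : xs ≠ []) (hy : ys ≠ []) :
    PySem.Chars.join sep (xs ++ ys) =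
      PySem.Chars.join sep xs ++ sep ++ PySem.Chars.join sep ys := by
  induction xs with
  | nil => exact absurd rfl hx
  | cons a t ih =>
    rcases t with _ | ⟨b, t'⟩
    · rcases ys with _ | ⟨y, ys'⟩
      · exact absurd rfl hy
      · simp [join_cons]
    · have : (b :: t') ++ ys ≠ [] := by simp
      rw [List.cons_append, join_cons sep a ((b :: t') ++ ys), if_neg this,
        ih (by simp), join_cons sep a (b :: t'), if_neg (by simp)]
      simp

-- properties of a joined nonempty paragraph of nonblank stripped lines
theorem join_paragraph {cur : List (List Char)} (hne : cur ≠ [])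
    (h : ∀ l ∈ cur, l ≠ [] ∧ PySem.Chars.strip l = l) :
    PySem.Chars.rstrip (PySem.Chars.join ['\n'] cur) = PySem.Chars.join ['\n'] cur ∧
      PySem.Chars.join ['\n'] cur ≠ [] := by
  induction cur with
  | nil => exact absurd rfl hne
  | cons l t ih =>
    have hl := h l (List.mem_cons_self ..)
    have hrl : PySem.Chars.rstrip l = l := (of_strip_eq_self hl.2).2
    rcases t with _ | ⟨b, t'⟩
    · rw [join_cons]; simpa [hrl] using hl.1
    · have iht := ih (by simp) (fun x hx => h x (List.mem_cons_of_mem _ hx))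
      rw [join_cons, if_neg (by simp)]
      have hJne : ['\n'] ++ PySem.Chars.join ['\n'] (b :: t') ≠ [] := by simp
      have hJr : PySem.Chars.rstrip (['\n'] ++ PySem.Chars.join ['\n'] (b :: t')) =
          ['\n'] ++ PySem.Chars.join ['\n'] (b :: t') := by
        rw [rstrip_append_of_ne_nil (by rw [iht.1]; exact iht.2), iht.1]
      constructor
      · rw [rstrip_append_of_ne_nil (by rw [hJr]; exact hJne), hJr]
      · simp [hl.1]

theorem lstrip_join_paragraphs {x : List Char} {t : List (List Char)} (hx : x ≠ [])
    (hsx : PySem.Chars.strip x = x) :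
    PySem.Chars.lstrip (PySem.Chars.join ['\n'] (x :: t)) = PySem.Chars.join ['\n'] (x :: t) := by
  rw [join_cons]
  exact lstrip_append_of_stripped hx (of_strip_eq_self hsx).1 _

-- ---- all-blank characterisations ----

theorem recA_eq_nil_iff (r : List (List Char)) :
    ∀ bc : Int, 1 ≤ bc → (recA r bc = [] ↔ ∀ l ∈ r, l = []) := by
  induction r with
  | nil => intro bc _; simp [recA]
  | cons l t ih =>
    intro bc hbc
    by_cases hl : l = []
    · subst hl
      rw [recA, if_pos rfl, if_neg (by omega)]
      rw [ih (bc + 1) (by omega)]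
      simp
    · rw [recA, if_neg hl]
      simp [hl]

theorem recB_ne_nil_of_cur (r : List (List Char)) :
    ∀ cur, cur ≠ [] → recB r cur ≠ [] := by
  induction r with
  | nil => intro cur h; simp [recB, h]
  | cons l t ih =>
    intro cur h
    rw [recB]
    by_cases hl : l = []
    · rw [if_pos hl, if_neg h]; simp
    · rw [if_neg hl]; exact ih _ (by simp)

theorem recB_eq_nil_iff (r : List (List Char)) : recB r [] = [] ↔ ∀ l ∈ r, l = [] := by
  induction r with
  | nil => simp [recB]
  | cons l t ih =>
    by_cases hl : l = []
    · subst hl; rw [recB, if_pos rfl, if_pos rfl, ih]; simp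
    · rw [recB, if_neg hl]
      constructor
      · intro h; exact absurd h (recB_ne_nil_of_cur t _ (by simp))
      · intro h; exact absurd (h l (List.mem_cons_self ..)) hl

theorem recB_paragraphs (r : List (List Char)) :
    ∀ cur, (∀ l ∈ r, PySem.Chars.strip l = l) → (∀ l ∈ cur, l ≠ [] ∧ PySem.Chars.strip l = l) →
      ∀ p ∈ recB r cur, p ≠ [] ∧ ∀ l ∈ p, l ≠ [] ∧ PySem.Chars.strip l = l := by
  induction r with
  | nil =>
    intro cur _ hcur p hp
    rw [recB] at hp
    by_cases h : cur = []
    · simp [h] at hp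
    · rw [if_neg h] at hp
      simp only [List.mem_singleton] at hp
      subst hp; exact ⟨h, hcur⟩
  | cons l t ih =>
    intro cur hr hcur p hp
    rw [recB] at hp
    by_cases hl : l = []
    · rw [if_pos hl] at hp
      by_cases hc : cur = []
      · rw [if_pos hc] at hp
        exact ih [] (fun x hx => hr x (List.mem_cons_of_mem _ hx)) (by simp) p hp
      · rw [if_neg hc] at hp
        rcases List.mem_cons.mp hp with h1 | h1
        · subst h1; exact ⟨hc, hcur⟩
        · exact ih [] (fun x hx => hr x (List.mem_cons_of_mem _ hx)) (by simp) p h1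
    · rw [if_neg hl] at hp
      refine ih (cur ++ [l]) (fun x hx => hr x (List.mem_cons_of_mem _ hx)) ?_ p hp
      intro x hx
      rcases List.mem_append.mp hx with h1 | h1
      · exact hcur x h1
      · simp only [List.mem_singleton] at h1
        exact h1 ▸ ⟨hl, hr l (List.mem_cons_self ..)⟩

theorem recA_head (r : List (List Char)) :
    ∀ bc : Int, 1 ≤ bc → ∀ x t, recA r bc = x :: t → x ≠ [] ∧ x ∈ r := by
  induction r with
  | nil => intro bc _ x t h; simp [recA] at h
  | cons l s ih =>
    intro bc hbc x t h
    by_cases hl : l = []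
    · subst hl
      rw [recA, if_pos rfl, if_neg (by omega)] at h
      obtain ⟨h1, h2⟩ := ih (bc + 1) (by omega) x t h
      exact ⟨h1, List.mem_cons_of_mem _ h2⟩
    · rw [recA, if_neg hl] at h
      rw [List.cons.injEq] at h
      exact ⟨h.1 ▸ hl, h.1 ▸ List.mem_cons_self ..⟩

-- ---- the main correspondence ----

theorem main_corr (ls : List (List Char)) :
    (∀ l ∈ ls, PySem.Chars.strip l = l) →
    (∀ bc : Int, 1 ≤ bc →
      PySem.Chars.rstrip (PySem.Chars.join ['\n'] (recA ls bc)) =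
        PySem.Chars.join ['\n', '\n'] ((recB ls []).map (PySem.Chars.join ['\n']))) ∧
    (∀ cur, cur ≠ [] → (∀ l ∈ cur, l ≠ [] ∧ PySem.Chars.strip l = l) →
      PySem.Chars.rstrip (PySem.Chars.join ['\n'] (cur ++ recA ls 0)) =
        PySem.Chars.join ['\n', '\n'] ((recB ls cur).map (PySem.Chars.join ['\n']))) := by
  induction ls with
  | nil =>
    intro _
    constructor
    · intro bc _
      rfl
    · intro cur hcur hcl
      have h1 : cur ++ recA [] 0 = cur := List.append_nil cur
      rw [h1, (join_paragraph hcur hcl).1, recB, if_neg hcur, List.map_singleton, join_cons]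
      simp
  | cons l r ih =>
    intro H
    have H' : ∀ x ∈ r, PySem.Chars.strip x = x := fun x hx => H x (List.mem_cons_of_mem _ hx)
    constructor
    · intro bc hbc
      by_cases hl : l = []
      · subst hl
        rw [recA, if_pos rfl, if_neg (by omega), recB, if_pos rfl, if_pos rfl]
        exact (ih H').1 (bc + 1) (by omega)
      · rw [recA, if_neg hl, recB, if_neg hl, List.nil_append]
        have hb := (ih H').2 [l] (by simp) (fun x hx => by
          simp only [List.mem_singleton] at hx
          exact hx ▸ ⟨hl, H l (List.mem_cons_self ..)⟩)
        simpa using hb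
    · intro cur hcur hcl
      by_cases hl : l = []
      · subst hl
        rw [recA, if_pos rfl, if_pos (by omega : (0 : Int) + 1 ≤ 1),
          show (0 : Int) + 1 = 1 by norm_num]
        rw [recB, if_pos rfl, if_neg hcur]
        rw [join_append ['\n'] hcur (by simp), join_cons ['\n'] [] (recA r 1), List.nil_append]
        by_cases h0 : recA r 1 = []
        · rw [if_pos h0, List.append_nil, rstrip_append_space (by decide),
            (join_paragraph hcur hcl).1]
          have hb : recB r [] = [] :=
            (recB_eq_nil_iff r).mpr ((recA_eq_nil_iff r 1 (by norm_num)).mp h0)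
          rw [hb, List.map_cons, List.map_nil, join_cons]
          simp
        · rw [if_neg h0]
          have hX := (ih H').1 1 (by norm_num)
          have hBne : recB r [] ≠ [] := fun hb =>
            h0 ((recA_eq_nil_iff r 1 (by norm_num)).mpr ((recB_eq_nil_iff r).mp hb))
          obtain ⟨p, ps, hps⟩ := List.exists_cons_of_ne_nil hBne
          have hp := recB_paragraphs r [] H' (by simp) p (hps ▸ List.mem_cons_self ..)
          have hXne : PySem.Chars.join ['\n', '\n'] ((recB r []).map (PySem.Chars.join ['\n'])) ≠ [] := by
            rw [hps, List.map_cons, join_cons]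
            intro hemp
            rcases List.append_eq_nil_iff.mp hemp with ⟨hemp1, _⟩
            exact (join_paragraph hp.1 hp.2).2 hemp1
          have hrs : PySem.Chars.rstrip (PySem.Chars.join ['\n'] (recA r 1)) ≠ [] := by
            rw [hX]; exact hXne
          rw [show PySem.Chars.join ['\n'] cur ++ ['\n'] ++ (['\n'] ++ PySem.Chars.join ['\n'] (recA r 1))
              = (PySem.Chars.join ['\n'] cur ++ ['\n', '\n']) ++ PySem.Chars.join ['\n'] (recA r 1) by simp]
          rw [rstrip_append_of_ne_nil hrs, hX, List.map_cons, join_cons,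
            if_neg (by simp [hBne])]
          simp [List.append_assoc]
      · rw [recA, if_neg hl, recB, if_neg hl]
        have hb := (ih H').2 (cur ++ [l]) (by simp) (fun x hx => by
          rcases List.mem_append.mp hx with h1 | h1
          · exact hcl x h1
          · simp only [List.mem_singleton] at h1
            exact h1 ▸ ⟨hl, H l (List.mem_cons_self ..)⟩)
        rw [show cur ++ l :: recA r 0 = (cur ++ [l]) ++ recA r 0 by simp]
        exact hb

-- ---- strip of a joined recA output (top level) ----

theorem top_corr (ls : List (List Char)) (H : ∀ l ∈ ls, PySem.Chars.strip l = l) :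
    PySem.Chars.strip (PySem.Chars.join ['\n'] (recA ls 0)) =
      PySem.Chars.join ['\n', '\n'] ((recB ls []).map (PySem.Chars.join ['\n'])) := by
  cases ls with
  | nil => rfl
  | cons l r =>
    have H' : ∀ x ∈ r, PySem.Chars.strip x = x := fun x hx => H x (List.mem_cons_of_mem _ hx)
    by_cases hl : l = []
    · subst hl
      rw [recA, if_pos rfl, if_pos (by omega : (0 : Int) + 1 ≤ 1),
        show (0 : Int) + 1 = 1 by norm_num]
      rw [recB, if_pos rfl, if_pos rfl]
      rw [join_cons, List.nil_append]
      by_cases h0 : recA r 1 = []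
      · rw [if_pos h0]
        have hb : recB r [] = [] :=
          (recB_eq_nil_iff r).mpr ((recA_eq_nil_iff r 1 (by norm_num)).mp h0)
        rw [hb]
        rfl
      · rw [if_neg h0]
        obtain ⟨x, t, hxt⟩ := List.exists_cons_of_ne_nil h0
        have hx := recA_head r 1 (by norm_num) x t hxt
        show PySem.Chars.rstrip (PySem.Chars.lstrip ('\n' :: PySem.Chars.join ['\n'] (recA r 1))) = _
        rw [lstrip_cons_space (by decide)]
        rw [hxt, lstrip_join_paragraphs hx.1 (H' x hx.2), ← hxt]
        exact (main_corr r H').1 1 (by norm_num)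
    · rw [recA, if_neg hl, recB, if_neg hl, List.nil_append]
      have hstrip := H l (List.mem_cons_self ..)
      show PySem.Chars.rstrip (PySem.Chars.lstrip (PySem.Chars.join ['\n'] (l :: recA r 0))) = _
      rw [lstrip_join_paragraphs hl hstrip]
      have hb := (main_corr r H').2 [l] (by simp) (fun x hx => by
        simp only [List.mem_singleton] at hx
        exact hx ▸ ⟨hl, hstrip⟩)
      simpa using hb

-- ---- linking the String-level ports to the char-level recursions ----

theorem foldA_eq (ls : List (List Char)) :
    ∀ (bc : Int) (acc : List String),
      ((ls.map String.ofList).foldl (fun (st : Int × List String) line =>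
        if line = "" then
          let bc := st.1 + 1
          if bc ≤ 1 then (bc, st.2 ++ [""]) else (bc, st.2)
        else (0, st.2 ++ [line])) (bc, acc)).2 = acc ++ (recA ls bc).map String.ofList := by
  induction ls with
  | nil => intro bc acc; simp [recA]
  | cons l r ih =>
    intro bc acc
    rw [List.map_cons, List.foldl_cons]
    by_cases hl : l = []
    · rw [if_pos ((ofList_eq_empty_iff l).mpr hl)]
      by_cases hbc : bc + 1 ≤ 1
      · simp only [if_pos hbc]
        rw [ih (bc + 1) (acc ++ [""])]
        rw [recA, if_pos hl, if_pos hbc]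
        simp
      · simp only [if_neg hbc]
        rw [ih (bc + 1) acc]
        rw [recA, if_pos hl, if_neg hbc]
    · rw [if_neg (fun h => hl ((ofList_eq_empty_iff l).mp h))]
      rw [ih 0 (acc ++ [String.ofList l])]
      rw [recA, if_neg hl]
      simp

theorem stepB_comm (P : List (List (List Char))) (C : List (List Char)) (l : List Char) :
    (let line := PySem.Str.strip (String.ofList l)
     if line ≠ "" then ((P.map (fun p => p.map String.ofList), C.map String.ofList).1,
         (P.map (fun p => p.map String.ofList), C.map String.ofList).2 ++ [line])
     else if (P.map (fun p => p.map String.ofList), C.map String.ofList).2 ≠ [] then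
         ((P.map (fun p => p.map String.ofList), C.map String.ofList).1 ++
           [(P.map (fun p => p.map String.ofList), C.map String.ofList).2], ([] : List String))
     else (P.map (fun p => p.map String.ofList), C.map String.ofList))
    = ((chStep (P, C) (PySem.Chars.strip l)).1.map (fun p => p.map String.ofList),
       (chStep (P, C) (PySem.Chars.strip l)).2.map String.ofList) := by
  have hstrip : PySem.Str.strip (String.ofList l) = String.ofList (PySem.Chars.strip l) := by
    simp [PySem.Str.strip]
  by_cases hl : PySem.Chars.strip l = []
  · by_cases hC : C = []
    · simp [hstrip, chStep, hl, hC]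
    · simp [hstrip, chStep, hl, hC]
  · simp [hstrip, chStep, hl]

theorem foldB_eq (ls : List (List Char)) :
    ∀ (P : List (List (List Char))) (C : List (List Char)),
      ((ls.map String.ofList).foldl (fun (st : List (List String) × List String) raw =>
        let line := PySem.Str.strip raw
        if line ≠ "" then (st.1, st.2 ++ [line])
        else if st.2 ≠ [] then (st.1 ++ [st.2], ([] : List String))
        else st) (P.map (fun p => p.map String.ofList), C.map String.ofList)) =
      ((foldBC (ls.map PySem.Chars.strip) (P, C)).1.map (fun p => p.map String.ofList),
        (foldBC (ls.map PySem.Chars.strip) (P, C)).2.map String.ofList) := by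
  induction ls with
  | nil => intro P C; simp [foldBC]
  | cons l r ih =>
    intro P C
    rw [List.map_cons, List.foldl_cons, List.map_cons, foldBC]
    rw [show _ = ((chStep (P, C) (PySem.Chars.strip l)).1.map (fun p => p.map String.ofList),
       (chStep (P, C) (PySem.Chars.strip l)).2.map String.ofList) from stepB_comm P C l]
    simpa using ih (chStep (P, C) (PySem.Chars.strip l)).1 (chStep (P, C) (PySem.Chars.strip l)).2

theorem flushB_eq (ls : List (List Char)) :
    ∀ P C, (if (foldBC ls (P, C)).2 ≠ [] then (foldBC ls (P, C)).1 ++ [(foldBC ls (P, C)).2]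
            else (foldBC ls (P, C)).1) = P ++ recB ls C := by
  induction ls with
  | nil =>
    intro P C
    by_cases hC : C = [] <;> simp [foldBC, recB, hC]
  | cons l r ih =>
    intro P C
    rw [foldBC, recB]
    by_cases hl : l = []
    · rw [if_pos hl]
      subst hl
      rw [chStep, if_neg (show ¬(([] : List Char) ≠ []) from fun h => h rfl)]
      by_cases hC : C = []
      · subst hC
        rw [if_pos rfl,
          if_neg (show ¬((P, ([] : List (List Char))).2 ≠ []) from fun h => h rfl)]
        exact ih P []
      · rw [if_neg hC, if_pos (show (P, C).2 ≠ [] from hC)]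
        rw [ih (P ++ [C]) []]
        simp
    · rw [if_neg hl, chStep, if_pos (show l ≠ [] from hl)]
      exact ih P (C ++ [l])

theorem str_strip_ofList (l : List Char) :
    PySem.Str.strip (String.ofList l) = String.ofList (PySem.Chars.strip l) := by
  simp [PySem.Str.strip]

theorem str_join_ofList (sep : String) (xs : List (List Char)) :
    PySem.Str.join sep (xs.map String.ofList) = String.ofList (PySem.Chars.join sep.toList xs) := by
  simp only [PySem.Str.join, List.map_map]
  rw [show (String.toList ∘ String.ofList) = (id : List Char → List Char)
    from funext fun l => String.toList_ofList, List.map_id]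

theorem portA_char (text : String) :
    normalize_plain_text_py text =
      String.ofList (PySem.Chars.strip (PySem.Chars.join ['\n']
        (recA ((PySem.Chars.splitlines text.toList).map PySem.Chars.strip) 0))) := by
  simp only [normalize_plain_text_py]
  have h1 : (PySem.Str.splitlines text).map (fun line => PySem.Str.strip line)
      = (((PySem.Chars.splitlines text.toList).map PySem.Chars.strip).map String.ofList) := by
    simp [PySem.Str.splitlines, List.map_map, Function.comp, str_strip_ofList]
  rw [h1, foldA_eq _ 0 [], List.nil_append, str_join_ofList, str_strip_ofList]
  rfl

theorem portB_char (text : String) :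
    normalize_plain_text_py_alt text =
      String.ofList (PySem.Chars.join ['\n', '\n']
        (((recB ((PySem.Chars.splitlines text.toList).map PySem.Chars.strip) []).map
          (PySem.Chars.join ['\n'])))) := by
  simp only [normalize_plain_text_py_alt]
  have h0 : PySem.Str.splitlines text = (PySem.Chars.splitlines text.toList).map String.ofList := rfl
  have h1 := foldB_eq (PySem.Chars.splitlines text.toList) [] []
  simp only [List.map_nil] at h1
  rw [h0, h1]
  set Q := foldBC ((PySem.Chars.splitlines text.toList).map PySem.Chars.strip) ([], []) with hQ
  have h2 : (if Q.2.map String.ofList ≠ [] then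
        Q.1.map (fun p => p.map String.ofList) ++ [Q.2.map String.ofList]
      else Q.1.map (fun p => p.map String.ofList))
      = (if Q.2 ≠ [] then Q.1 ++ [Q.2] else Q.1).map (fun p => p.map String.ofList) := by
    by_cases hC : Q.2 = [] <;> simp [hC]
  rw [h2]
  have h3 := flushB_eq ((PySem.Chars.splitlines text.toList).map PySem.Chars.strip) [] []
  rw [← hQ] at h3
  rw [h3, List.nil_append]
  set R := recB ((PySem.Chars.splitlines text.toList).map PySem.Chars.strip) []
  have h4 : (R.map (fun p => p.map String.ofList)).map (fun p => PySem.Str.join "\n" p)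
      = (R.map (PySem.Chars.join ['\n'])).map String.ofList := by
    simp only [List.map_map]
    refine List.map_congr_left (fun p _ => ?_)
    simpa using str_join_ofList "\n" p
  rw [h4, str_join_ofList]
  rfl

-- ===== VERDICT (by name: the statement is the Claim_ definition above) =====
theorem normalize_plain_text_py_spec : Claim_equal_normalize_plain_text_py := by
  intro text _
  unfold Spec_normalize_plain_text_py
  rw [portA_char, portB_char]
  exact congrArg String.ofList (top_corr _ (fun l hl => by
    obtain ⟨x, _, rfl⟩ := List.mem_map.mp hl
    exact strip_strip x))
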